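-- pv_equiv track=rewrite | github.com/variationalkk/Deep-learning-for-web-attacks-detection | Code/DataProcess/data_proess.py | is_Pure_strings
-- ===== SOURCE A (Python) =====
-- def is_Pure_strings(string):
--     '''
--     check a string is PureString or mixed string
--     '''
--     number=['0','1','2','3','4','5','6','7','8','9']
--
--     for i in range(len(number)):
--         if number[i] in string:
--             result= False
--             break
--         else:
--             result= True
--     return result
-- ===== SOURCE B (Python) =====
-- def is_Pure_strings(string):
--     digits = set('0123456789')
--     return all(c not in digits for c in string)
-- ===== Notes on version B (the rewrite author's own statement) =====
-- stated objective: idiomatic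
-- what changed: Replaced A's loop over the 10 digit characters (each doing a full substring scan of the input) by a single pass over the input's characters testing membership in a digit set.
import Mathlib
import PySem

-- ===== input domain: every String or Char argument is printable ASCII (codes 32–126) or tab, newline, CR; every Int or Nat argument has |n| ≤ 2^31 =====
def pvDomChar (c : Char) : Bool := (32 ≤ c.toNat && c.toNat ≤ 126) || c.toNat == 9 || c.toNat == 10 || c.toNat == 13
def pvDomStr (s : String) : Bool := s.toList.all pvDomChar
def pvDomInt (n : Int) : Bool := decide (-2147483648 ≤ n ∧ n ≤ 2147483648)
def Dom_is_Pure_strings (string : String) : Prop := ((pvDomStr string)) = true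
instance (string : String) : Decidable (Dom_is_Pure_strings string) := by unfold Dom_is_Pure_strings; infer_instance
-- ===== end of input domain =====

-- B replaces A's loop over the 10 digit characters (each a full substring scan of the input)
-- by a single pass over the input's characters testing membership in a digit set (idiomatic).


-- ===== PORT A =====
-- the for-loop over number with break: recursion over the remaining digits, carrying `result`
def pvALoop (string : String) : List Char → Bool → Bool
  | [], result => result
  | d :: ds, _ => if PySem.Str.isIn (String.ofList [d]) string then false else pvALoop string ds true

def is_Pure_strings (string : String) : Bool :=
  let number : List Char := ['0','1','2','3','4','5','6','7','8','9']
  pvALoop string number true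

-- ===== PORT B =====
def is_Pure_strings_alt (string : String) : Bool :=
  let digits : PySem.Set Char := PySem.Set.ofList "0123456789".toList
  string.toList.all (fun c => !(PySem.Set.contains digits c))

-- ===== PRECONDITION & SPEC =====
def Spec_is_Pure_strings (string : String) (out : Bool) : Prop := out = is_Pure_strings_alt string
instance (string : String) (out : Bool) : Decidable (Spec_is_Pure_strings string out) := by unfold Spec_is_Pure_strings; infer_instance

-- ===== CLAIM (what is proved, stated in full; the proofs are below) =====
def Claim_equal_is_Pure_strings : Prop := ∀ (string : String), Dom_is_Pure_strings string → Spec_is_Pure_strings string (is_Pure_strings string)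

-- ===== LEMMAS AND PROOFS =====

-- a one-character substring test is character membership
theorem isIn_singleton (d : Char) (l : List Char) :
    PySem.Chars.isIn [d] l = l.contains d := by
  rw [Bool.eq_iff_iff]
  simp [PySem.Chars.isIn_iff_infix]
  constructor
  · intro h; exact h.sublist.subset (List.mem_singleton_self d)
  · intro h
    obtain ⟨pre, suf, e⟩ := List.append_of_mem h
    exact ⟨pre, suf, by rw [e]; simp⟩

theorem pvALoop_eq (s : String) (ds : List Char) (hds : ds ≠ []) :
    pvALoop s ds true = ds.all (fun d => !(s.toList.contains d)) := by
  induction ds with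
  | nil => simp at hds
  | cons d t ih =>
    by_cases ht : t = []
    · subst ht
      simp [pvALoop, PySem.Str.isIn_eq, isIn_singleton]
    · simp [pvALoop, PySem.Str.isIn_eq, isIn_singleton, ih ht]

theorem all_not_contains_comm (xs ys : List Char) :
    xs.all (fun d => !(ys.contains d)) = ys.all (fun c => !(xs.contains c)) := by
  rw [Bool.eq_iff_iff]
  simp [List.all_eq_true]
  exact ⟨fun h c hc hd => h _ hd hc, fun h d hd hc => h _ hc hd⟩

-- ===== VERDICT (by name: the statement is the Claim_ definition above) =====
theorem is_Pure_strings_spec : Claim_equal_is_Pure_strings := by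
  intro s _
  show is_Pure_strings s = is_Pure_strings_alt s
  rw [is_Pure_strings, is_Pure_strings_alt, pvALoop_eq _ _ (by simp),
      all_not_contains_comm]
  simp [PySem.Set.contains]
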